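-- pv_equiv track=rewrite | github.com/hotternative/leetcode | 1737_3_conditions.py | _condition2
-- ===== SOURCE A (Python) =====
-- import string
--
-- def _condition2(a, b):
--     m2 = 1000000
--     for s in string.ascii_lowercase[:-1]:
--         countb = 0
--         for c in b:
--             if c > s:
--                 countb += 1
--
--         counta = 0
--         for c in a:
--             if c <= s:
--                 counta += 1
--
--         if m2 > (counta + countb):
--             m2 = counta + countb
--     return m2
-- ===== SOURCE B (Python) =====
-- import string
--
-- def _condition2(a, b):
--     # One counting pass per string into 128-slot code-frequency arrays,
--     # then a single prefix-sum sweep over the codes taking the min.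
--     cnt_a = [0] * 128
--     cnt_b = [0] * 128
--     for c in a:
--         cnt_a[ord(c)] += 1
--     for c in b:
--         cnt_b[ord(c)] += 1
--     best = 1000000
--     ta = 0  # chars of a with code <= i (prefix sum)
--     tb = 0  # chars of b with code <= i
--     for i in range(128):
--         ta += cnt_a[i]
--         tb += cnt_b[i]
--         if 97 <= i < 122:  # thresholds 'a'..'y'
--             v = ta + len(b) - tb
--             if v < best:
--                 best = v
--     return best
-- ===== Notes on version B (the rewrite author's own statement) =====
-- stated objective: faster
-- what changed: Replaces the 25-threshold loop that rescans both strings per threshold with one counting pass per string into 128-slot code-frequency arrays followed by a single prefix-sum sweep that takes the min.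
import Mathlib
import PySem

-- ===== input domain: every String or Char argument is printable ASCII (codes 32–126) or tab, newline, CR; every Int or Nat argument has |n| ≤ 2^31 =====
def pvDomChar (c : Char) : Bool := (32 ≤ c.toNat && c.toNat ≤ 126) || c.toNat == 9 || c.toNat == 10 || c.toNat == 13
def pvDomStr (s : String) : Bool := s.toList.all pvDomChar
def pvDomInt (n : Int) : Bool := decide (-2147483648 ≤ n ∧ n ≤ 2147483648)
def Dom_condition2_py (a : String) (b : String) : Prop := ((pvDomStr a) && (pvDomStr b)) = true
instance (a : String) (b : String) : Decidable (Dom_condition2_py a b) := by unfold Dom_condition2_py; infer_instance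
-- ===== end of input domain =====

-- B replaces the 25-threshold rescan of both strings by one frequency pass per
-- string plus a single prefix-sum sweep taking the min (objective: faster, constant factor).

-- ===== PORT A =====
def condition2_py (a : String) (b : String) : Int :=
  -- string.ascii_lowercase[:-1]
  (PySem.List.slice "abcdefghijklmnopqrstuvwxyz".toList none (some (-1))).foldl
    (fun m2 s =>
      let countb := b.toList.foldl (fun n c => if s < c then n + 1 else n) (0 : Int)
      let counta := a.toList.foldl (fun n c => if c ≤ s then n + 1 else n) (0 : Int)
      if m2 > counta + countb then counta + countb else m2)
    1000000

-- ===== PORT B =====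
def condition2_py_alt (a : String) (b : String) : Int :=
  -- freq_a[c] = freq_a.get(c, 0) + 1  per char
  let fa := a.toList.foldl (fun d c => d.modify c 0 (· + 1)) (PySem.Dict.empty (κ := Char) (ν := Int))
  let fb := b.toList.foldl (fun d c => d.modify c 0 (· + 1)) (PySem.Dict.empty (κ := Char) (ν := Int))
  -- for i in range(128): prefix sums ta, tb; min over thresholds 97 ≤ i < 122
  let r := (PySem.List.pyRange 0 128 1).foldl
    (fun (st : Int × Int × Int) i =>
      let ta := st.1 + fa.getD (Char.ofNat i.toNat) 0   -- chr(i), 0 ≤ i < 128 in this loop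
      let tb := st.2.1 + fb.getD (Char.ofNat i.toNat) 0
      let best := if 97 ≤ i ∧ i < 122 then
          let v := ta + PySem.Str.len b - tb
          if v < st.2.2 then v else st.2.2
        else st.2.2
      (ta, tb, best))
    (0, 0, 1000000)
  r.2.2

-- ===== PRECONDITION & SPEC =====
def Spec_condition2_py (a : String) (b : String) (out : Int) : Prop := out = condition2_py_alt a b
instance (a : String) (b : String) (out : Int) : Decidable (Spec_condition2_py a b out) := by unfold Spec_condition2_py; infer_instance

-- ===== CLAIM (what is proved, stated in full; the proofs are below) =====
def Claim_equal_condition2_py : Prop := ∀ (a : String) (b : String), Dom_condition2_py a b → Spec_condition2_py a b (condition2_py a b)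

-- ===== LEMMAS AND PROOFS =====

-- count of chars with code < j (proof-side helper)
def cLt (l : List Char) (j : Int) : Int := (l.countP (fun c => decide ((c.toNat : Int) < j)) : Int)

-- value at one threshold of code i: (chars of a ≤ chr i) + (chars of b > chr i)
def gval (a b : String) (i : Int) : Int :=
  cLt a.toList (i + 1) + PySem.Str.len b - cLt b.toList (i + 1)

-- the min-update step both characterizations share
def mstep (a b : String) (m i : Int) : Int :=
  if 97 ≤ i ∧ i < 122 then (if gval a b i < m then gval a b i else m) else m

lemma cLt_zero (l : List Char) : cLt l 0 = 0 := by
  simp [cLt, List.countP_eq_zero]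

lemma toNat_ofNat_of_lt (j : Nat) (h : j < 128) : (Char.ofNat j).toNat = j := by
  unfold Char.ofNat
  rw [dif_pos (by left; omega : Nat.isValidChar j)]
  rfl

lemma countP_lt_succ (l : List Char) (j : Int) (h0 : 0 ≤ j) (h1 : j < 128) :
    l.countP (fun c => decide ((c.toNat : Int) < j + 1)) =
      l.countP (fun c => decide ((c.toNat : Int) < j)) + l.count (Char.ofNat j.toNat) := by
  have hv : ((Char.ofNat j.toNat).toNat : Int) = j := by
    rw [toNat_ofNat_of_lt _ (by omega)]; omega
  induction l with
  | nil => simp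
  | cons c l ih =>
    rw [List.countP_cons, List.countP_cons, List.count_cons, ih]
    by_cases hc : c = Char.ofNat j.toNat
    · subst hc
      rw [show (decide (((Char.ofNat j.toNat).toNat : Int) < j + 1)) = true from by
            rw [hv]; exact decide_eq_true (by omega),
          show (decide (((Char.ofNat j.toNat).toNat : Int) < j)) = false from by
            rw [hv]; exact decide_eq_false (by omega)]
      simp
      omega
    · have hcn : (c.toNat : Int) ≠ j := by
        intro h
        apply hc
        rw [← Char.ofNat_toNat c]
        congr 1
        omega
      have hd : (decide ((c.toNat : Int) < j + 1)) = (decide ((c.toNat : Int) < j)) := by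
        by_cases h : (c.toNat : Int) < j
        · rw [decide_eq_true (by omega), decide_eq_true h]
        · rw [decide_eq_false (by omega), decide_eq_false h]
      have hb : (c == Char.ofNat j.toNat) = false := by simp [hc]
      rw [hd, hb]
      simp
      omega

lemma cLt_succ (l : List Char) (j : Int) (h0 : 0 ≤ j) (h1 : j < 128) :
    cLt l (j + 1) = cLt l j + (l.count (Char.ofNat j.toNat) : Int) := by
  simp only [cLt, countP_lt_succ l j h0 h1]
  push_cast
  ring

-- chars ↔ codes: the combined value of A's two inner counts at threshold s
lemma inner_val (a b : String) (s : Char) :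
    (a.toList.countP (fun c => decide (c ≤ s)) : Int) +
      (b.toList.countP (fun c => decide (s < c)) : Int) = gval a b ((s.toNat : Int)) := by
  have hle : ∀ (l : List Char), l.countP (fun c => decide (c ≤ s)) =
      l.countP (fun c => decide ((c.toNat : Int) < (s.toNat : Int) + 1)) := by
    intro l
    apply List.countP_congr
    intro c _
    have h : (c ≤ s) ↔ ((c.toNat : Int) < (s.toNat : Int) + 1) := by
      rw [Char.le_def, UInt32.le_iff_toNat_le]; simp only [Char.toNat]; omega
    simp [h]
  have hsum : b.toList.countP (fun c => decide ((c.toNat : Int) < (s.toNat : Int) + 1)) +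
      b.toList.countP (fun c => decide (s < c)) = b.toList.length := by
    rw [List.length_eq_countP_add_countP
      (p := fun c => decide ((c.toNat : Int) < (s.toNat : Int) + 1)) (l := b.toList)]
    congr 1
    apply List.countP_congr
    intro c _
    have h : (s < c) ↔ ¬((c.toNat : Int) < (s.toNat : Int) + 1) := by
      rw [Char.lt_def, UInt32.lt_iff_toNat_lt]; simp only [Char.toNat]; omega
    simp [h]
  rw [hle]
  simp only [gval, cLt, PySem.Str.len_eq]
  omega

-- B's prefix-sweep step with the frequency dicts written out (zeta-reduced body of the port)
def bstep (a b : String) (st : Int × Int × Int) (i : Int) : Int × Int × Int :=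
  let ta := st.1 + (a.toList.foldl (fun d c => d.modify c 0 (· + 1))
      (PySem.Dict.empty (κ := Char) (ν := Int))).getD (Char.ofNat i.toNat) 0
  let tb := st.2.1 + (b.toList.foldl (fun d c => d.modify c 0 (· + 1))
      (PySem.Dict.empty (κ := Char) (ν := Int))).getD (Char.ofNat i.toNat) 0
  let best := if 97 ≤ i ∧ i < 122 then
      let v := ta + PySem.Str.len b - tb
      if v < st.2.2 then v else st.2.2
    else st.2.2
  (ta, tb, best)

lemma getD_freq (l : List Char) (v : Char) :
    (l.foldl (fun d c => d.modify c 0 (· + 1)) (PySem.Dict.empty (κ := Char) (ν := Int))).getD v 0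
      = (l.count v : Int) := by
  simpa using PySem.Dict.getD_foldl_insert_add_one l (PySem.Dict.empty (κ := Char) (ν := Int)) v

lemma bstep_eq (a b : String) (j m : Int) (h0 : 0 ≤ j) (h1 : j < 128) :
    bstep a b (cLt a.toList j, cLt b.toList j, m) j
      = (cLt a.toList (j + 1), cLt b.toList (j + 1), mstep a b m j) := by
  simp only [bstep]
  rw [getD_freq a.toList, getD_freq b.toList]
  rw [← cLt_succ a.toList j h0 h1, ← cLt_succ b.toList j h0 h1]
  simp only [mstep, gval]

lemma bloop (a b : String) (n : Nat) : ∀ (j m : Int), 0 ≤ j → j + n = 128 →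
    ((PySem.List.pyRange j 128 1).foldl (bstep a b) (cLt a.toList j, cLt b.toList j, m)).2.2
      = (PySem.List.pyRange j 128 1).foldl (mstep a b) m := by
  induction n with
  | zero =>
    intro j m h0 hj
    rw [PySem.List.pyRange_one_eq_nil (by omega)]
    simp
  | succ n ih =>
    intro j m h0 hj
    rw [PySem.List.pyRange_one_cons (by omega)]
    simp only [List.foldl_cons]
    rw [bstep_eq a b j m h0 (by omega)]
    exact ih (j + 1) (mstep a b m j) (by omega) (by omega)

lemma A_char (a b : String) : condition2_py a b
    = (PySem.List.pyRange 97 122 1).foldl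
        (fun m i => if gval a b i < m then gval a b i else m) 1000000 := by
  unfold condition2_py
  have hs : PySem.List.slice "abcdefghijklmnopqrstuvwxyz".toList none (some (-1))
      = "abcdefghijklmnopqrstuvwxy".toList := by decide
  rw [hs]
  have hcong := PySem.List.foldl_congr_mem
    (l := "abcdefghijklmnopqrstuvwxy".toList) (init := (1000000 : Int))
    (f := fun m2 s =>
      let countb := b.toList.foldl (fun n c => if s < c then n + 1 else n) (0 : Int)
      let counta := a.toList.foldl (fun n c => if c ≤ s then n + 1 else n) (0 : Int)
      if m2 > counta + countb then counta + countb else m2)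
    (g := fun m2 s => if gval a b ((s.toNat : Int)) < m2 then gval a b ((s.toNat : Int)) else m2)
    (by
      intro acc s _
      simp only [PySem.List.foldl_ite_add_one, zero_add]
      rw [inner_val a b s])
  rw [hcong]
  have hmap : PySem.List.pyRange 97 122 1
      = "abcdefghijklmnopqrstuvwxy".toList.map (fun s => ((s.toNat : Int))) := by decide
  rw [hmap, List.foldl_map]

-- ===== VERDICT =====
theorem condition2_py_spec : Claim_equal_condition2_py := by
  intro a b _hdom
  unfold Spec_condition2_py
  rw [A_char a b]
  show _ = condition2_py_alt a b
  unfold condition2_py_alt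
  simp only []
  rw [show ((0 : Int), (0 : Int), (1000000 : Int))
      = (cLt a.toList 0, cLt b.toList 0, (1000000 : Int)) from by
    rw [cLt_zero, cLt_zero]]
  rw [show ((PySem.List.pyRange 0 128 1).foldl
        (fun (st : Int × Int × Int) i =>
          let ta := st.1 + (a.toList.foldl (fun d c => d.modify c 0 (· + 1))
              (PySem.Dict.empty (κ := Char) (ν := Int))).getD (Char.ofNat i.toNat) 0
          let tb := st.2.1 + (b.toList.foldl (fun d c => d.modify c 0 (· + 1))
              (PySem.Dict.empty (κ := Char) (ν := Int))).getD (Char.ofNat i.toNat) 0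
          let best := if 97 ≤ i ∧ i < 122 then
              let v := ta + PySem.Str.len b - tb
              if v < st.2.2 then v else st.2.2
            else st.2.2
          (ta, tb, best))
        (cLt a.toList 0, cLt b.toList 0, 1000000))
      = ((PySem.List.pyRange 0 128 1).foldl (bstep a b)
        (cLt a.toList 0, cLt b.toList 0, 1000000)) from rfl]
  rw [bloop a b 128 0 1000000 (by omega) (by omega)]
  rw [PySem.List.pyRange_one_append 0 97 128 (by omega) (by omega),
      PySem.List.pyRange_one_append 97 122 128 (by omega) (by omega),
      List.foldl_append, List.foldl_append]
  have hlow : ∀ m : Int, List.foldl (mstep a b) m (PySem.List.pyRange 0 97 1) = m := by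
    intro m
    rw [PySem.List.foldl_congr_mem (PySem.List.pyRange 0 97 1) (mstep a b)
        (fun (acc : Int) (_ : Int) => acc) m
        (by
          intro acc x hx
          have := (PySem.List.mem_pyRange_one).1 hx
          simp only [mstep]
          rw [if_neg (by omega)])]
    exact PySem.List.foldl_ignore _ m
  have hhigh : ∀ m : Int, List.foldl (mstep a b) m (PySem.List.pyRange 122 128 1) = m := by
    intro m
    rw [PySem.List.foldl_congr_mem (PySem.List.pyRange 122 128 1) (mstep a b)
        (fun (acc : Int) (_ : Int) => acc) m
        (by
          intro acc x hx
          have := (PySem.List.mem_pyRange_one).1 hx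
          simp only [mstep]
          rw [if_neg (by omega)])]
    exact PySem.List.foldl_ignore _ m
  rw [hlow, hhigh]
  exact (PySem.List.foldl_congr_mem (PySem.List.pyRange 97 122 1) (mstep a b)
    (fun (m : Int) (i : Int) => if gval a b i < m then gval a b i else m) 1000000
    (by
      intro acc x hx
      have := (PySem.List.mem_pyRange_one).1 hx
      simp only [mstep]
      rw [if_pos (by omega)])).symm
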